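-- pv_equiv track=rewrite | github.com/pypi-data/pypi-mirror-247 | packages/idem-azure/idem_azure-2.5.0-py3-none-any.whl/idem_azure/tool/azure/compute/virtual_machines.py | compare_update_dict_payload
-- ===== SOURCE A (Python) =====
-- from typing import Any
-- from typing import Dict
--
-- def compare_update_dict_payload(
--     existing_payload: Dict[str, Any], update_payload: Dict[str, Any]
-- ):
--     """
--     Compares the payload to check whether any of the state attributes has been added or modified.
--     Returns true if there is any updates else false.
--
--     Args:
--         existing_payload(Dict): Existing payload
--         update_payload(Dict): Present value which will be given as input
--
--     Returns:
--         A boolean value, True if there is any difference between the arguments else returns False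
--     """
--     for parameter in update_payload:
--         if parameter in existing_payload:
--             if update_payload.get(parameter) != existing_payload.get(parameter):
--                 return True
--         else:
--             return True
--     return False
-- ===== SOURCE B (Python) =====
-- def compare_update_dict_payload(existing_payload, update_payload):
--     # merge-then-compare: overlaying update on existing changes nothing iff no update is needed
--     return {**existing_payload, **update_payload} != existing_payload
-- ===== Notes on version B (the rewrite author's own statement) =====
-- stated objective: idiomatic
-- what changed: Instead of A's key-by-key loop with membership tests and early returns, B builds the merged dict {**existing_payload, **update_payload} once and returns whether it differs from existing_payload under whole-dict equality.
import Mathlib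
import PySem

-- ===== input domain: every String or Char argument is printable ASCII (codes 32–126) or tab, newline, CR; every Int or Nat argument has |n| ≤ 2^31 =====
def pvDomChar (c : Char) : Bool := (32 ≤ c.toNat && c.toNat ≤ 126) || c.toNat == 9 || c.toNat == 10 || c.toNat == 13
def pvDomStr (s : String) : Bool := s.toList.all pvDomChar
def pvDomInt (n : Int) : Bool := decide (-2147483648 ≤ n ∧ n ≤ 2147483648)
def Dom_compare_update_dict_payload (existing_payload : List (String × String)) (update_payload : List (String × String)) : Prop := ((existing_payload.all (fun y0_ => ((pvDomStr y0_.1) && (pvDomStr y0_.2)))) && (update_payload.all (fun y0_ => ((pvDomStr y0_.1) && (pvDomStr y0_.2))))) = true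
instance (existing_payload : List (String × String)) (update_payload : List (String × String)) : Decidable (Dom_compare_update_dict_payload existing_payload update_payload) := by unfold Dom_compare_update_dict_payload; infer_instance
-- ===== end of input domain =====

-- B replaces A's key-by-key loop with early returns by building the merged dict
-- {**existing, **update} once and comparing it to existing with dict equality (objective: idiomatic).
-- Dicts are association lists in insertion order with first-match lookup.

-- ===== PORT A =====
-- dict.get(k): first match in the association list
def pvLookup (d : List (String × String)) (k : String) : Option String :=
  (d.find? (fun q => q.1 == k)).map (·.2)

-- 'k in d'
def pvContains (d : List (String × String)) (k : String) : Bool :=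
  d.any (fun q => q.1 == k)

-- the 'for parameter in update_payload' loop; lookups go into the full dicts
def pvLoopA (existing_payload update_payload : List (String × String)) :
    List (String × String) → Bool
  | [] => false
  | p :: rest =>
    if pvContains existing_payload p.1 then
      if pvLookup update_payload p.1 ≠ pvLookup existing_payload p.1 then true
      else pvLoopA existing_payload update_payload rest
    else true

def compare_update_dict_payload (existing_payload : List (String × String)) (update_payload : List (String × String)) : Bool :=
  pvLoopA existing_payload update_payload update_payload

-- ===== PORT B =====
-- the items of the dict an association list denotes: first occurrence of each key, in order
def pvItems : List (String × String) → List (String × String)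
  | [] => []
  | p :: rest => p :: pvItems (rest.filter (fun q => ¬ (q.1 == p.1)))
termination_by l => l.length
decreasing_by
  simpa using Nat.lt_succ_of_le (le_trans (List.length_filter_le _ _) (le_of_eq List.length_attach))

-- the PySem.Dict holding the dict an association list denotes
def pvDictOf (d : List (String × String)) : PySem.Dict String String :=
  (pvItems d).foldl (fun acc p => acc.insert p.1 p.2) PySem.Dict.empty

-- {**existing_payload, **update_payload}: items of both dicts inserted in order
def pvMerged (e u : List (String × String)) : PySem.Dict String String :=
  (pvItems e ++ pvItems u).foldl (fun acc p => acc.insert p.1 p.2) PySem.Dict.empty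

-- Python's dict ==: order-insensitive (same size, every item of the left found in the right)
def pvDictEq (d1 d2 : PySem.Dict String String) : Bool :=
  d1.size == d2.size && d1.items.all (fun p => d2.get? p.1 == some p.2)

def compare_update_dict_payload_alt (existing_payload : List (String × String)) (update_payload : List (String × String)) : Bool :=
  ! pvDictEq (pvMerged existing_payload update_payload) (pvDictOf existing_payload)

-- ===== PRECONDITION & SPEC =====
def Spec_compare_update_dict_payload (existing_payload : List (String × String)) (update_payload : List (String × String)) (out : Bool) : Prop := out = compare_update_dict_payload_alt existing_payload update_payload
instance (existing_payload : List (String × String)) (update_payload : List (String × String)) (out : Bool) : Decidable (Spec_compare_update_dict_payload existing_payload update_payload out) := by unfold Spec_compare_update_dict_payload; infer_instance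

-- ===== CLAIM (what is proved, stated in full; the proofs are below) =====
def Claim_equal_compare_update_dict_payload : Prop := ∀ (existing_payload : List (String × String)) (update_payload : List (String × String)), Dom_compare_update_dict_payload existing_payload update_payload → Spec_compare_update_dict_payload existing_payload update_payload (compare_update_dict_payload existing_payload update_payload)

-- ===== LEMMAS AND PROOFS =====

-- clean unfolding and induction principle for pvItems (its auto eq-lemmas carry attach noise)
theorem pvItems_cons (p : String × String) (rest : List (String × String)) :
    pvItems (p :: rest) = p :: pvItems (rest.filter (fun q => ¬ (q.1 == p.1))) := by
  rw [pvItems]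

theorem pvItems_ind (motive : List (String × String) → Prop)
    (h1 : motive [])
    (h2 : ∀ (p : String × String) (rest : List (String × String)),
      motive (rest.filter (fun q => ¬ (q.1 == p.1))) → motive (p :: rest)) :
    ∀ l, motive l := by
  intro l
  induction h : l.length using Nat.strong_induction_on generalizing l with
  | _ n ih =>
    cases l with
    | nil => exact h1
    | cons p rest =>
      refine h2 p rest (ih (rest.filter (fun q => ¬ (q.1 == p.1))).length ?_ _ rfl)
      subst h
      simpa using Nat.lt_succ_of_le (List.length_filter_le _ _)

-- the per-key check A performs
def pvOkA (existing_payload update_payload : List (String × String)) (k : String) : Bool :=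
  pvContains existing_payload k && (pvLookup update_payload k == pvLookup existing_payload k)

theorem pvContains_iff (d : List (String × String)) (k : String) :
    pvContains d k = (pvLookup d k).isSome := by
  induction d with
  | nil => simp [pvContains, pvLookup]
  | cons q rest ih =>
    by_cases h : (q.1 == k) = true
    · simp [pvContains, pvLookup, h]
    · simp only [pvContains, pvLookup, List.any_cons, List.find?_cons, h, Bool.false_or]
      simpa [pvContains, pvLookup] using ih

theorem pvLoopA_eq_all (ex up : List (String × String)) (l : List (String × String)) :
    pvLoopA ex up l = !(l.all (fun p => pvOkA ex up p.1)) := by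
  induction l with
  | nil => simp [pvLoopA]
  | cons p rest ih =>
    by_cases hc : pvContains ex p.1
    · by_cases hne : pvLookup up p.1 = pvLookup ex p.1
      · have hok : pvOkA ex up p.1 = true := by simp [pvOkA, hc, hne]
        simp [pvLoopA, hc, hne, hok, ih]
      · have hok : pvOkA ex up p.1 = false := by simp [pvOkA, hne]
        simp [pvLoopA, hc, hne, hok]
    · have hok : pvOkA ex up p.1 = false := by simp [pvOkA, hc]
      simp [pvLoopA, hc, hok]

theorem pvItems_subset (l : List (String × String)) :
    ∀ p ∈ pvItems l, p ∈ l := by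
  induction l using pvItems_ind with
  | h1 => simp [pvItems]
  | h2 q rest ih =>
    intro p hp
    rw [pvItems_cons] at hp
    rcases List.mem_cons.mp hp with hp | hp
    · exact hp ▸ List.mem_cons_self
    · exact List.mem_cons_of_mem _ (List.mem_filter.mp (ih p hp)).1

theorem pvLookup_filter (rest : List (String × String)) (q1 k : String)
    (h : ¬ (k == q1) = true) :
    pvLookup (rest.filter (fun r => ¬ (r.1 == q1))) k = pvLookup rest k := by
  induction rest with
  | nil => simp
  | cons r rest ih =>
    by_cases hr : (r.1 == q1) = true
    · have h1 : r.1 = q1 := by simpa using hr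
      have hrk : (r.1 == k) = false := by cases hk2 : (r.1 == k) <;> simp_all
      rw [show ((r :: rest).filter (fun r => ¬ (r.1 == q1)))
            = rest.filter (fun r => ¬ (r.1 == q1)) from by simp [h1], ih]
      simp [pvLookup, hrk]
    · rw [show ((r :: rest).filter (fun r => ¬ (r.1 == q1)))
            = r :: rest.filter (fun r => ¬ (r.1 == q1)) from by simp [(by simpa using hr : ¬ r.1 = q1)]]
      by_cases hk2 : (r.1 == k) = true
      · simp [pvLookup, hk2]
      · simp only [pvLookup, List.find?_cons, hk2]
        simpa [pvLookup] using ih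

theorem pvItems_lookup (up : List (String × String)) :
    ∀ p ∈ pvItems up, pvLookup up p.1 = some p.2 := by
  induction up using pvItems_ind with
  | h1 => simp [pvItems]
  | h2 q rest ih =>
    intro p hp
    rw [pvItems_cons] at hp
    rcases List.mem_cons.mp hp with hp | hp
    · subst hp; simp [pvLookup]
    · have hmem := pvItems_subset _ p hp
      have hne : ¬ (p.1 == q.1) = true := by
        have := (List.mem_filter.mp hmem).2
        simpa using this
      have hq : (q.1 == p.1) = false := by
        cases h : (q.1 == p.1) <;> simp_all [BEq.comm]
      have := ih p hp
      rw [pvLookup_filter rest q.1 p.1 hne] at this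
      simp [pvLookup, hq]
      simpa [pvLookup] using this

theorem pvItems_keys (up : List (String × String)) (k : String) :
    (∃ p ∈ pvItems up, p.1 = k) ↔ (∃ p ∈ up, p.1 = k) := by
  induction up using pvItems_ind with
  | h1 => simp [pvItems]
  | h2 q rest ih =>
    rw [pvItems_cons]
    simp only [List.mem_cons]
    constructor
    · rintro ⟨p, hp | hp, hk⟩
      · exact ⟨p, Or.inl hp, hk⟩
      · rcases ih.mp ⟨p, hp, hk⟩ with ⟨r, hr, hrk⟩
        exact ⟨r, Or.inr (List.mem_filter.mp hr).1, hrk⟩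
    · rintro ⟨p, hp | hp, hk⟩
      · exact ⟨p, Or.inl hp, hk⟩
      · by_cases hq : (p.1 == q.1) = true
        · exact ⟨q, Or.inl rfl, ((by simpa using hq : p.1 = q.1).symm.trans hk)⟩
        · rcases ih.mpr ⟨p, List.mem_filter.mpr ⟨hp, by simpa using hq⟩, hk⟩ with ⟨r, hr, hrk⟩
          exact ⟨r, Or.inr hr, hrk⟩

theorem pvItems_nodup_keys (l : List (String × String)) :
    ((pvItems l).map (·.1)).Nodup := by
  induction l using pvItems_ind with
  | h1 => simp [pvItems]
  | h2 q rest ih =>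
    rw [pvItems_cons]
    refine List.nodup_cons.mpr ⟨?_, ih⟩
    intro hmem
    rcases List.mem_map.mp hmem with ⟨p, hp, hk⟩
    have := (List.mem_filter.mp (pvItems_subset _ p hp)).2
    simp [hk] at this

-- first-match find? over pvItems = first-match lookup in the original list
theorem find?_pvItems (e : List (String × String)) (k : String) :
    ((pvItems e).find? (fun p => p.1 == k)).map (·.2) = pvLookup e k := by
  cases hf : (pvItems e).find? (fun p => p.1 == k) with
  | some p =>
    have hp := List.mem_of_find?_eq_some hf
    have hk : p.1 = k := by simpa using List.find?_some hf
    have := pvItems_lookup e p hp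
    rw [hk] at this
    simp [this]
  | none =>
    simp only [Option.map_none]
    cases hl : pvLookup e k with
    | none => rfl
    | some v =>
      exfalso
      have hs : pvContains e k = true := by rw [pvContains_iff, hl]; rfl
      rcases (by simpa [pvContains] using hs : ∃ x, (k, x) ∈ e) with ⟨v2, hv2⟩
      rcases (pvItems_keys e k).mpr ⟨(k, v2), hv2, rfl⟩ with ⟨r, hr, hrk⟩
      have := List.find?_eq_none.mp hf r hr
      simp [hrk] at this

-- get? after a fold of inserts over a nodup-keyed list: the (only) match, else the base dict
theorem get?_foldl_insert (l : List (String × String)) (d : PySem.Dict String String) (k : String)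
    (hl : ((l.map (·.1)).Nodup)) :
    (l.foldl (fun acc p => acc.insert p.1 p.2) d).get? k
      = (match l.find? (fun p => p.1 == k) with
         | some p => some p.2
         | none => d.get? k) := by
  induction l generalizing d with
  | nil => simp
  | cons p rest ih =>
    simp only [List.map_cons, List.nodup_cons] at hl
    by_cases hk : (p.1 == k) = true
    · have hkeq : p.1 = k := by simpa using hk
      have hnone : rest.find? (fun q => q.1 == k) = none := by
        rw [List.find?_eq_none]
        intro q hq hqk
        exact hl.1 (List.mem_map.mpr ⟨q, hq, by rw [hkeq]; simpa using hqk⟩)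
      simp only [List.foldl_cons, List.find?_cons, hk]
      rw [ih _ hl.2, hnone]
      rw [← hkeq]
      exact PySem.Dict.get?_insert_self _ _ _
    · simp only [List.foldl_cons, List.find?_cons, hk]
      rw [ih _ hl.2]
      cases hf : rest.find? (fun q => q.1 == k)
      · simp only []
        exact PySem.Dict.get?_insert_of_ne _ _ (fun h => hk (by simp [h]))
      · rfl

-- the existing dict: its items, keys, size, lookups
theorem items_pvDictOf (e : List (String × String)) :
    (pvDictOf e).items = pvItems e := by
  have h := PySem.Dict.items_foldl_insert_fresh (pvItems e) (fun p => p.1) (fun p => p.2)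
      PySem.Dict.empty (fun a _ => PySem.Dict.contains_empty _) (pvItems_nodup_keys e)
  simpa [pvDictOf] using h

theorem get?_pvDictOf (e : List (String × String)) (k : String) :
    (pvDictOf e).get? k = pvLookup e k := by
  unfold pvDictOf
  rw [get?_foldl_insert _ _ _ (pvItems_nodup_keys e)]
  have := find?_pvItems e k
  cases hf : (pvItems e).find? (fun p => p.1 == k) with
  | some p => rw [hf] at this; simpa using this
  | none =>
    rw [hf] at this
    simp only []
    rw [PySem.Dict.get?_empty]
    simpa using this

-- the merged dict: its lookups and keys
theorem pvMerged_eq (e u : List (String × String)) :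
    pvMerged e u = (pvItems u).foldl (fun acc p => acc.insert p.1 p.2) (pvDictOf e) := by
  unfold pvMerged pvDictOf
  rw [List.foldl_append]

theorem get?_pvMerged (e u : List (String × String)) (k : String) :
    (pvMerged e u).get? k
      = (match pvLookup u k with
         | some v => some v
         | none => pvLookup e k) := by
  rw [pvMerged_eq, get?_foldl_insert _ _ _ (pvItems_nodup_keys u)]
  have := find?_pvItems u k
  cases hf : (pvItems u).find? (fun p => p.1 == k) with
  | some p =>
    rw [hf] at this
    simp only [Option.map_some] at this
    rw [← this]
  | none =>
    rw [hf] at this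
    simp only [Option.map_none] at this
    rw [← this]
    exact get?_pvDictOf e k

theorem keys_pvMerged (e u : List (String × String)) :
    (pvMerged e u).keys
      = PySem.Set.update ((pvItems e).map (·.1)) ((pvItems u).map (·.1)) := by
  rw [pvMerged_eq]
  have h := PySem.Dict.keys_foldl_insert_key (pvItems u) (fun p => p.1)
      (fun _ p => p.2) (pvDictOf e)
  have hk : (pvDictOf e).keys = (pvItems e).map (·.1) := by
    simp [PySem.Dict.keys, items_pvDictOf]
  rw [hk] at h
  exact h

theorem nodup_keys_pvMerged (e u : List (String × String)) :
    (pvMerged e u).keys.Nodup := by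
  rw [pvMerged_eq]
  have hbase : (pvDictOf e).keys.Nodup := by
    have hk : (pvDictOf e).keys = (pvItems e).map (·.1) := by
      simp [PySem.Dict.keys, items_pvDictOf]
    rw [hk]; exact pvItems_nodup_keys e
  exact PySem.Dict.nodup_keys_foldl_insert_key (pvItems u) (fun p => p.1)
    (fun _ p => p.2) (pvDictOf e) hbase

-- membership in a key list ↔ a first-match lookup succeeds
theorem mem_keys_iff_lookup (l : List (String × String)) (k : String) :
    k ∈ (pvItems l).map (·.1) ↔ (pvLookup l k).isSome := by
  rw [← pvContains_iff]
  constructor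
  · intro h
    rcases List.mem_map.mp h with ⟨p, hp, hk⟩
    rcases (pvItems_keys l k).mp ⟨p, hp, hk⟩ with ⟨r, hr, hrk⟩
    exact List.any_eq_true.mpr ⟨r, hr, by simpa using hrk⟩
  · intro h
    rcases (by simpa [pvContains] using h : ∃ x, (k, x) ∈ l) with ⟨v2, hv2⟩
    rcases (pvItems_keys l k).mpr ⟨(k, v2), hv2, rfl⟩ with ⟨r, hr, hrk⟩
    exact List.mem_map.mpr ⟨r, hr, hrk⟩

-- the central bridge: B's dict comparison computes exactly A's all-keys check
theorem pvDictEq_eq_all (ex up : List (String × String)) :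
    pvDictEq (pvMerged ex up) (pvDictOf ex) = up.all (fun p => pvOkA ex up p.1) := by
  by_cases hA : up.all (fun p => pvOkA ex up p.1) = true
  · -- every key of up is in ex with an equal value: the two dicts are equal as maps
    have hok : ∀ k, (pvLookup up k).isSome →
        pvContains ex k = true ∧ pvLookup up k = pvLookup ex k := by
      intro k hs
      have hcu : pvContains up k = true := (pvContains_iff up k).symm ▸ hs
      rcases (by simpa [pvContains] using hcu : ∃ x, (k, x) ∈ up) with ⟨v2, hv2⟩
      have := List.all_eq_true.mp hA (k, v2) hv2
      simp only [pvOkA, Bool.and_eq_true, beq_iff_eq] at this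
      exact this
    have hkeys : (pvMerged ex up).keys = (pvItems ex).map (·.1) := by
      rw [keys_pvMerged, PySem.Set.update_eq_append_filter]
      have : ((PySem.Set.ofList ((pvItems up).map (·.1))).filter
          (fun y => !(PySem.Set.contains ((pvItems ex).map (·.1)) y))) = [] := by
        rw [List.filter_eq_nil_iff]
        intro k hk
        have hk' : k ∈ (pvItems up).map (·.1) := (PySem.Set.mem_ofList _ _).mp hk
        have hs := (mem_keys_iff_lookup up k).mp hk'
        have hex := (hok k hs).1
        have : k ∈ (pvItems ex).map (·.1) := by
          rw [mem_keys_iff_lookup, ← pvContains_iff]; exact hex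
        simp [PySem.Set.contains, this]
      rw [this, List.append_nil]
    have hsz : (pvMerged ex up).size = (pvDictOf ex).size := by
      have h1 : (pvMerged ex up).size = (pvMerged ex up).keys.length := by
        simp [PySem.Dict.size, PySem.Dict.keys]
      have h2 : (pvDictOf ex).size = (pvItems ex).length := by
        simp [PySem.Dict.size, items_pvDictOf]
      rw [h1, hkeys, h2, List.length_map]
    have hall : (pvMerged ex up).items.all
        (fun p => (pvDictOf ex).get? p.1 == some p.2) = true := by
      rw [List.all_eq_true]
      intro p hp
      have hg : (pvMerged ex up).get? p.1 = some p.2 :=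
        PySem.Dict.get?_of_mem_items _ hp (nodup_keys_pvMerged ex up)
      rw [get?_pvMerged] at hg
      rw [get?_pvDictOf]
      cases hu : pvLookup up p.1 with
      | some v =>
        rw [hu] at hg
        simp only [] at hg
        have h2 := (hok p.1 (by rw [hu]; rfl)).2
        rw [hu] at h2
        simp [h2.symm.trans hg]
      | none =>
        rw [hu] at hg
        simp only [] at hg
        simp [hg]
    rw [hA, pvDictEq, hsz, hall]
    simp
  · -- some key of up is missing from ex or has a different value
    rw [Bool.not_eq_true, List.all_eq_false] at hA
    rcases hA with ⟨p, hp, hok⟩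
    have hok0 : pvOkA ex up p.1 = false := by simpa using hok
    have hup : (pvLookup up p.1).isSome := by
      rw [← pvContains_iff]
      unfold pvContains
      exact List.any_eq_true.mpr ⟨p, hp, by simp⟩
    rcases Option.isSome_iff_exists.mp hup with ⟨v, hv⟩
    have hcase : (pvContains ex p.1 && (pvLookup up p.1 == pvLookup ex p.1)) = false := by
      rw [← pvOkA]; exact hok0
    have hgoal : pvDictEq (pvMerged ex up) (pvDictOf ex) = false := by
      rcases Bool.and_eq_false_iff.mp hcase with hc | hne
      · -- p.1 is a new key: the merged dict is strictly larger
        have hnotex : p.1 ∉ (pvItems ex).map (·.1) := by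
          rw [mem_keys_iff_lookup, ← pvContains_iff]
          simp [hc]
        have hinup : p.1 ∈ (pvItems up).map (·.1) := (mem_keys_iff_lookup up p.1).mpr hup
        have hmem : p.1 ∈ ((PySem.Set.ofList ((pvItems up).map (·.1))).filter
            (fun y => !(PySem.Set.contains ((pvItems ex).map (·.1)) y))) := by
          rw [List.mem_filter]
          refine ⟨(PySem.Set.mem_ofList _ _).mpr hinup, ?_⟩
          simp [PySem.Set.contains, hnotex]
        have hlen : (pvMerged ex up).keys.length ≠ ((pvItems ex).map (·.1)).length := by
          rw [keys_pvMerged, PySem.Set.update_eq_append_filter, List.length_append]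
          have := List.length_pos_of_mem hmem
          omega
        have hsz : ((pvMerged ex up).size == (pvDictOf ex).size) = false := by
          rw [beq_eq_false_iff_ne]
          intro h
          apply hlen
          have h2 : (pvDictOf ex).size = ((pvItems ex).map (·.1)).length := by
            simp [PySem.Dict.size, items_pvDictOf]
          have h1 : (pvMerged ex up).size = (pvMerged ex up).keys.length := by
            simp [PySem.Dict.size, PySem.Dict.keys]
          rw [h1, h2] at h
          exact h
        rw [pvDictEq, hsz, Bool.false_and]
      · -- p.1 maps to different values: the item (p.1, v) of merged fails the check
        have hne' : pvLookup up p.1 ≠ pvLookup ex p.1 := by simpa using hne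
        have hg : (pvMerged ex up).get? p.1 = some v := by
          rw [get?_pvMerged, hv]
        have hitem : (p.1, v) ∈ (pvMerged ex up).items :=
          PySem.Dict.mem_items_of_get?_eq_some _ hg
        have hfail : ((pvDictOf ex).get? (p.1, v).1 == some (p.1, v).2) = false := by
          rw [beq_eq_false_iff_ne]
          show (pvDictOf ex).get? p.1 ≠ some v
          rw [get?_pvDictOf]
          intro h
          exact hne' (hv.trans h.symm)
        have hall : (pvMerged ex up).items.all
            (fun q => (pvDictOf ex).get? q.1 == some q.2) = false :=
          List.all_eq_false.mpr ⟨(p.1, v), hitem, by simp [hfail]⟩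
        rw [pvDictEq, hall, Bool.and_false]
    rw [hgoal, eq_comm, List.all_eq_false]
    exact ⟨p, hp, by simp [hok0]⟩

-- ===== VERDICT (by name: the statement is the Claim_ definition above) =====
theorem compare_update_dict_payload_spec : Claim_equal_compare_update_dict_payload := by
  intro ex up _
  unfold Spec_compare_update_dict_payload compare_update_dict_payload compare_update_dict_payload_alt
  rw [pvLoopA_eq_all, pvDictEq_eq_all]
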